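-- pv_equiv track=rewrite | github.com/empirehazeclaw/empirehazeclaw | skills/guardrails/output_guardrail.py | check_trigger_alignment
-- ===== SOURCE A (Python) =====
-- def check_trigger_alignment(action: str, trigger: str) -> tuple:
--     """
--     Verify action was properly aligned with its trigger.
--
--     Returns:
--         (status, details)
--     """
--     trigger_lower = trigger.lower()
--     action_lower = action.lower()
--
--     # Parse trigger type
--     is_file = "file" in trigger_lower and ("received" in trigger_lower or "exists" in trigger_lower)
--     is_message = any(w in trigger_lower for w in ["message", "wrote", "said", "told"])
--     is_cron = "cron" in trigger_lower or "completed" in trigger_lower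
--     is_command = any(w in trigger_lower for w in ["check", "run", "do", "execute", "fix"])
--
--     # Check alignment
--     aligned = True
--     issues = []
--
--     if is_file and "file" not in action_lower:
--         aligned = False
--         issues.append("Action doesn't match file trigger")
--
--     if is_message and not any(w in action_lower for w in ["respond", "reply", "message", "transcribe"]):
--         if "respond" not in action_lower and "reply" not in action_lower:
--             issues.append("Action doesn't match message trigger")
--
--     if is_cron and "cron" not in action_lower and "check" not in action_lower:
--         if "report" not in action_lower:
--             issues.append("Action doesn't match cron trigger")
--
--     if aligned:
--         return ("OK", "Action properly aligned with trigger")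
--     else:
--         return ("MISALIGNED", "; ".join(issues))
-- ===== SOURCE B (Python) =====
-- # Table-driven re-implementation: the three trigger/action checks become one
-- # rule table (trigger CNF clauses, excusing action keywords, fatal flag, message)
-- # folded by a single comprehension; status = any fatal rule fired.
-- RULES = [
--     (True,  [["file"], ["received", "exists"]],
--             ["file"], "Action doesn't match file trigger"),
--     (False, [["message", "wrote", "said", "told"]],
--             ["respond", "reply", "message", "transcribe"], "Action doesn't match message trigger"),
--     (False, [["cron", "completed"]],
--             ["cron", "check", "report"], "Action doesn't match cron trigger"),
-- ]
--
--
-- def check_trigger_alignment(action: str, trigger: str) -> tuple: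
--     t = trigger.lower()
--     a = action.lower()
--     fired = [(fatal, msg) for fatal, clauses, excuses, msg in RULES
--              if all(any(w in t for w in clause) for clause in clauses)
--              and not any(w in a for w in excuses)]
--     if any(fatal for fatal, _ in fired):
--         return ("MISALIGNED", "; ".join(msg for _, msg in fired))
--     return ("OK", "Action properly aligned with trigger")
-- ===== Notes on version B (the rewrite author's own statement) =====
-- stated objective: alternative
-- what changed: A hardcodes three separate if-blocks with a dead 'aligned' flag; B is table-driven: one rule table (trigger CNF clauses, excusing action keywords, fatal flag, message) folded by a single comprehension, with status = any fatal rule fired.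
import Mathlib
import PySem

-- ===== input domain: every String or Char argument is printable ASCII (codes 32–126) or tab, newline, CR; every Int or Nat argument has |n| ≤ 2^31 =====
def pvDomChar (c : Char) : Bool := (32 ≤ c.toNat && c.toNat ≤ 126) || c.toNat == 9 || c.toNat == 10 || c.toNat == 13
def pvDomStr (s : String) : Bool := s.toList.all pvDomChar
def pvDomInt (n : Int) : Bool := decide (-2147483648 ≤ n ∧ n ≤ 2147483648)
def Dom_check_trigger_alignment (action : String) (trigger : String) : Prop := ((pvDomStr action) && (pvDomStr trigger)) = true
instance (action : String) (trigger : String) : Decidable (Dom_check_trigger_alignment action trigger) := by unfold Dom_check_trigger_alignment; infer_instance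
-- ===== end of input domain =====

-- B replaces A's three hardcoded if-blocks (with their dead 'aligned' flag) by one
-- data-driven rule table folded by a single filter/map pass; same values, alternative structure.

-- ===== PORT A =====
def check_trigger_alignment (action : String) (trigger : String) : String × String :=
  let trigger_lower := PySem.Str.lower trigger
  let action_lower := PySem.Str.lower action
  let is_file := PySem.Str.isIn "file" trigger_lower &&
      (PySem.Str.isIn "received" trigger_lower || PySem.Str.isIn "exists" trigger_lower)
  let is_message := (["message", "wrote", "said", "told"] : List String).any
      (fun w => PySem.Str.isIn w trigger_lower)
  let is_cron := PySem.Str.isIn "cron" trigger_lower || PySem.Str.isIn "completed" trigger_lower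
  let _is_command := (["check", "run", "do", "execute", "fix"] : List String).any
      (fun w => PySem.Str.isIn w trigger_lower)
  let aligned := true
  let issues : List String := []
  let (aligned, issues) :=
    if is_file && !PySem.Str.isIn "file" action_lower then
      (false, issues ++ ["Action doesn't match file trigger"])
    else (aligned, issues)
  let issues :=
    if is_message && !((["respond", "reply", "message", "transcribe"] : List String).any
        (fun w => PySem.Str.isIn w action_lower)) then
      if !PySem.Str.isIn "respond" action_lower && !PySem.Str.isIn "reply" action_lower then
        issues ++ ["Action doesn't match message trigger"]
      else issues
    else issues
  let issues :=
    if is_cron && !PySem.Str.isIn "cron" action_lower && !PySem.Str.isIn "check" action_lower then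
      if !PySem.Str.isIn "report" action_lower then
        issues ++ ["Action doesn't match cron trigger"]
      else issues
    else issues
  if aligned then ("OK", "Action properly aligned with trigger")
  else ("MISALIGNED", PySem.Str.join "; " issues)

-- ===== PORT B =====
-- rule = (fatal flag, trigger CNF clauses, excusing action keywords, issue message)
def pvRules : List (Bool × List (List String) × List String × String) :=
  [ (true,  [["file"], ["received", "exists"]],
            (["file"], "Action doesn't match file trigger")),
    (false, [["message", "wrote", "said", "told"]],
            (["respond", "reply", "message", "transcribe"], "Action doesn't match message trigger")),
    (false, [["cron", "completed"]],
            (["cron", "check", "report"], "Action doesn't match cron trigger")) ]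

def check_trigger_alignment_alt (action : String) (trigger : String) : String × String :=
  let t := PySem.Str.lower trigger
  let a := PySem.Str.lower action
  let fired : List (Bool × String) :=
    (pvRules.filter (fun r =>
        r.2.1.all (fun clause => clause.any (fun w => PySem.Str.isIn w t)) &&
        !(r.2.2.1.any (fun w => PySem.Str.isIn w a)))).map
      (fun r => (r.1, r.2.2.2))
  if fired.any (fun p => p.1) then
    ("MISALIGNED", PySem.Str.join "; " (fired.map (fun p => p.2)))
  else ("OK", "Action properly aligned with trigger")

-- ===== PRECONDITION & SPEC =====
def Spec_check_trigger_alignment (action : String) (trigger : String) (out : String × String) : Prop := out = check_trigger_alignment_alt action trigger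
instance (action : String) (trigger : String) (out : String × String) : Decidable (Spec_check_trigger_alignment action trigger out) := by unfold Spec_check_trigger_alignment; infer_instance

-- ===== CLAIM (what is proved, stated in full; the proofs are below) =====
def Claim_equal_check_trigger_alignment : Prop := ∀ (action : String) (trigger : String), Dom_check_trigger_alignment action trigger → Spec_check_trigger_alignment action trigger (check_trigger_alignment action trigger)

-- ===== LEMMAS AND PROOFS =====

-- ===== VERDICT (by name: the statement is the Claim_ definition above) =====
theorem check_trigger_alignment_spec : Claim_equal_check_trigger_alignment := by
  intro action trigger _
  unfold Spec_check_trigger_alignment check_trigger_alignment check_trigger_alignment_alt pvRules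
  simp only [List.filter_cons, List.filter_nil, List.any_cons, List.any_nil, List.all_cons, List.all_nil,
    Bool.or_false, Bool.and_true]
  generalize (PySem.Str.isIn "file" (PySem.Str.lower trigger) &&
      (PySem.Str.isIn "received" (PySem.Str.lower trigger) ||
       PySem.Str.isIn "exists" (PySem.Str.lower trigger))) = isf
  generalize (PySem.Str.isIn "message" (PySem.Str.lower trigger) ||
      (PySem.Str.isIn "wrote" (PySem.Str.lower trigger) ||
       (PySem.Str.isIn "said" (PySem.Str.lower trigger) ||
        PySem.Str.isIn "told" (PySem.Str.lower trigger)))) = ims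
  generalize (PySem.Str.isIn "cron" (PySem.Str.lower trigger) ||
      PySem.Str.isIn "completed" (PySem.Str.lower trigger)) = isc
  generalize (PySem.Str.isIn "message" (PySem.Str.lower action) ||
      PySem.Str.isIn "transcribe" (PySem.Str.lower action)) = mt
  generalize PySem.Str.isIn "file" (PySem.Str.lower action) = fa
  generalize PySem.Str.isIn "respond" (PySem.Str.lower action) = r1
  generalize PySem.Str.isIn "reply" (PySem.Str.lower action) = r2
  generalize PySem.Str.isIn "cron" (PySem.Str.lower action) = ca
  generalize PySem.Str.isIn "check" (PySem.Str.lower action) = ck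
  generalize PySem.Str.isIn "report" (PySem.Str.lower action) = rp
  revert isf ims isc mt fa r1 r2 ca ck rp
  decide
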